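-- pv_equiv track=rewrite | github.com/kkamggik/algorithms | Programmers/햄버거만들기.py | solution
-- ===== SOURCE A (Python) =====
-- def solution(ingredient):
--     answer = 0
--     stack = []
--     order = [1,2,3,1]
--     for ing in ingredient:
--         stack.append(ing)
--         if(len(stack) >= 4 and stack[-4:]==order):
--             for i in range(4): stack.pop()
--             answer += 1
--     return answer
-- ===== SOURCE B (Python) =====
-- def _find(items):
--     i = 0
--     while i + 4 <= len(items):
--         if items[i:i + 4] == [1, 2, 3, 1]:
--             return i
--         i += 1
--     return None
--
--
-- def solution(ingredient):
--     items = list(ingredient)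
--     count = 0
--     while True:
--         i = _find(items)
--         if i is None:
--             return count
--         items = items[:i] + items[i + 4:]
--         count += 1
-- ===== Notes on version B (the rewrite author's own statement) =====
-- stated objective: alternative
-- what changed: Replaces A's single incremental stack pass (push each ingredient, pop 4 when the stack top matches [1,2,3,1]) with a repeated leftmost full-scan-and-delete loop: find the first index where a length-4 slice equals [1,2,3,1], delete that slice, count, and restart until no occurrence remains.
import Mathlib
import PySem

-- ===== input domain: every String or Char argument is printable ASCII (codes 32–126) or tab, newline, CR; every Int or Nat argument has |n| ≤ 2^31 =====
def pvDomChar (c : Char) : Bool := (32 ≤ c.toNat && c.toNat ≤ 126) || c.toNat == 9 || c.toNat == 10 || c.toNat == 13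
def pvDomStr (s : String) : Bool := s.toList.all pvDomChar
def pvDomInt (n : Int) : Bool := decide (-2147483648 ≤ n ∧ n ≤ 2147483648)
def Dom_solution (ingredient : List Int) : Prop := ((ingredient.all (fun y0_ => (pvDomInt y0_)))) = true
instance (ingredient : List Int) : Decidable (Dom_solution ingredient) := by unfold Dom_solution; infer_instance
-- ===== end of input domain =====

-- B replaces A's incremental stack pass by a repeated leftmost scan-and-delete of the
-- slice [1,2,3,1]; same return value on every input (objective: alternative algorithm).

-- ===== PORT A =====
def solution (ingredient : List Int) : Int :=
  -- answer = 0; stack = []; order = [1,2,3,1]; for ing in ingredient: ...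
  (ingredient.foldl
    (fun (st : Int × List Int) ing =>
      let stack := st.2 ++ [ing]                     -- stack.append(ing)
      if stack.length ≥ 4 ∧ PySem.List.slice stack (some (-4)) none = [1, 2, 3, 1] then
        -- for i in range(4): stack.pop()  ; answer += 1
        (st.1 + 1, (PySem.List.pyRange 0 4 1).foldl (fun s _ => s.dropLast) stack)
      else (st.1, stack))
    (0, [])).1

-- ===== PORT B =====
-- the constant list [1,2,3,1] of Source B
def patB : List Int := [1, 2, 3, 1]

-- _find(items): scan i upward; items[i:i+4] == [1,2,31] slice with Nat bounds is
-- (items.drop i).take 4 (PySem.List.slice_natCast_add), exact here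
def findPat (items : List Int) (i : Nat) : Option Nat :=
  if i + 4 ≤ items.length then
    if (items.drop i).take 4 = patB then some i
    else findPat items (i + 1)
  else none
termination_by items.length - i

-- termination fact the port's loop needs: a found index leaves room for the 4 deleted items
theorem findPat_some_le (items : List Int) (i j : Nat) (h : findPat items i = some j) :
    j + 4 ≤ items.length := by
  induction i using findPat.induct (items := items) with
  | case1 i hle hpat => unfold findPat at h; simp [hle, hpat] at h; omega
  | case2 i hle hpat ih => unfold findPat at h; simp [hle, hpat] at h; exact ih h
  | case3 i hle => unfold findPat at h; simp [hle] at h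

-- while True: i = _find(items); if None return count; items = items[:i] + items[i+4:]; count += 1
def altGo (items : List Int) (count : Int) : Int :=
  match h : findPat items 0 with
  | none => count
  | some i => altGo (items.take i ++ items.drop (i + 4)) (count + 1)
termination_by items.length
decreasing_by
  have := findPat_some_le items 0 i h
  simp [List.length_append, List.length_take, List.length_drop]
  omega

def solution_alt (ingredient : List Int) : Int :=
  altGo ingredient 0

-- ===== PRECONDITION & SPEC =====
def Spec_solution (ingredient : List Int) (out : Int) : Prop := out = solution_alt ingredient
instance (ingredient : List Int) (out : Int) : Decidable (Spec_solution ingredient out) := by unfold Spec_solution; infer_instance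

-- ===== CLAIM (what is proved, stated in full; the proofs are below) =====
def Claim_equal_solution : Prop := ∀ (ingredient : List Int), Dom_solution ingredient → Spec_solution ingredient (solution ingredient)

-- ===== LEMMAS AND PROOFS =====

-- an occurrence of the pattern starting at index j
def occAt (t : List Int) (j : Nat) : Prop := (t.drop j).take 4 = patB

theorem occAt_len (t : List Int) (j : Nat) (h : occAt t j) : j + 4 ≤ t.length := by
  have := congrArg List.length h
  simp [patB] at this ⊢
  omega

theorem findPat_none_of (t : List Int) (i : Nat) (h : ∀ j, i ≤ j → ¬ occAt t j) :
    findPat t i = none := by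
  induction i using findPat.induct (items := t) with
  | case1 i hle hpat => exact absurd hpat (h i le_rfl)
  | case2 i hle hpat ih =>
      unfold findPat
      simp [hle, hpat]
      exact ih (fun j hj => h j (by omega))
  | case3 i hle => unfold findPat; simp [hle]

theorem findPat_some_of (t : List Int) (i j : Nat) (hij : i ≤ j) (hocc : occAt t j)
    (hmin : ∀ k, i ≤ k → k < j → ¬ occAt t k) : findPat t i = some j := by
  induction i using findPat.induct (items := t) with
  | case1 i hle hpat =>
      unfold findPat
      simp [hle, hpat]
      rcases lt_or_eq_of_le hij with h | h
      · exact absurd hpat (hmin i le_rfl h)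
      · omega
  | case2 i hle hpat ih =>
      unfold findPat
      simp [hle, hpat]
      have hne : i ≠ j := fun he => hpat (he ▸ hocc)
      exact ih (by omega) (fun k hk1 hk2 => hmin k (by omega) hk2)
  | case3 i hle =>
      have := occAt_len t j hocc
      omega

-- A's branch test equals "the stack ends in the pattern"
theorem cond_iff (stack : List Int) :
    (stack.length ≥ 4 ∧ PySem.List.slice stack (some (-4)) none = [1, 2, 3, 1]) ↔
      stack.drop (stack.length - 4) = patB := by
  rw [PySem.List.slice_from_neg_ofNat stack 4 (by omega)]
  constructor
  · rintro ⟨_, h⟩; exact h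
  · intro h
    have hlen := congrArg List.length h
    simp [patB] at hlen
    exact ⟨by omega, h⟩

-- A's four pops undo exactly the pattern suffix
theorem dropLast_four (u : List Int) :
    (PySem.List.pyRange 0 4 1).foldl (fun s _ => s.dropLast) (u ++ patB) = u := by
  have : PySem.List.pyRange 0 4 1 = [0, 1, 2, 3] := by decide
  rw [this]
  show ((((u ++ patB).dropLast).dropLast).dropLast).dropLast = u
  have h1 : u ++ patB = (((u ++ [1]) ++ [2]) ++ [3]) ++ [(1 : Int)] := by
    simp [patB]
  rw [h1, List.dropLast_concat, List.dropLast_concat, List.dropLast_concat,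
    List.dropLast_concat]

-- no occurrence anywhere in `t`
def NoOcc (t : List Int) : Prop := ∀ j, ¬ occAt t j

theorem altGo_of_none (items : List Int) (c : Int) (h : findPat items 0 = none) :
    altGo items c = c := by
  rw [altGo.eq_def]
  split
  · rfl
  · rename_i i hi; rw [h] at hi; cases hi

theorem altGo_of_some (items : List Int) (c : Int) (i : Nat) (h : findPat items 0 = some i) :
    altGo items c = altGo (items.take i ++ items.drop (i + 4)) (c + 1) := by
  rw [altGo.eq_def]
  split
  · rename_i hi; rw [h] at hi; cases hi
  · rename_i j hj; rw [h] at hj; cases hj; rfl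

theorem noOcc_append_singleton (s : List Int) (x : Int)
    (hs : NoOcc s) (hend : ¬ (s ++ [x]).drop ((s ++ [x]).length - 4) = patB) :
    NoOcc (s ++ [x]) := by
  intro j hocc
  have hlen := occAt_len _ _ hocc
  simp at hlen
  by_cases hj : j + 4 ≤ s.length
  · apply hs j
    unfold occAt at hocc ⊢
    rw [List.drop_append_of_le_length (by omega)] at hocc
    rw [List.take_append_of_le_length (by simp; omega)] at hocc
    exact hocc
  · -- j + 4 = s.length + 1, so the occurrence is the full suffix
    have hj4 : j = (s ++ [x]).length - 4 := by simp; omega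
    apply hend
    subst hj4
    unfold occAt at hocc
    rw [List.take_of_length_le (by simp; omega)] at hocc
    exact hocc

-- main loop correspondence: A's fold from a pattern-free stack equals B's loop on stack ++ rest
theorem main_lemma (l : List Int) : ∀ (s : List Int) (c : Int), NoOcc s →
    (l.foldl
      (fun (st : Int × List Int) ing =>
        let stack := st.2 ++ [ing]
        if stack.length ≥ 4 ∧ PySem.List.slice stack (some (-4)) none = [1, 2, 3, 1] then
          (st.1 + 1, (PySem.List.pyRange 0 4 1).foldl (fun s _ => s.dropLast) stack)
        else (st.1, stack))
      (c, s)).1 = altGo (s ++ l) c := by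
  induction l with
  | nil =>
      intro s c hs
      simp only [List.foldl, List.append_nil]
      rw [altGo_of_none s c (findPat_none_of s 0 (fun j _ => hs j))]
  | cons x l' ih =>
      intro s c hs
      simp only [List.foldl]
      by_cases hc : ((s ++ [x]).length ≥ 4 ∧
          PySem.List.slice (s ++ [x]) (some (-4)) none = [1, 2, 3, 1])
      · -- match case: stack ends with the pattern
        rw [if_pos hc]
        have h4 : (s ++ [x]).drop ((s ++ [x]).length - 4) = patB := (cond_iff _).mp hc
        have hlen : 4 ≤ s.length + 1 := by have := hc.1; simpa using this
        set u : List Int := (s ++ [x]).take ((s ++ [x]).length - 4) with hu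
        have hsplit : s ++ [x] = u ++ patB := by rw [hu, ← h4, List.take_append_drop]
        have hulen : u.length = s.length - 3 := by
          rw [hu]; rw [List.length_take]; simp; omega
        have hlen2 : (s ++ [x]).length - 4 = s.length - 3 := by simp
        have huprefix : u = s.take (s.length - 3) := by
          rw [hu, hlen2]; exact List.take_append_of_le_length (by omega)
        have hun : NoOcc u := by
          intro j hocc
          have hl := occAt_len _ _ hocc
          apply hs j
          unfold occAt at hocc ⊢
          rw [huprefix, List.drop_take, List.take_take] at hocc
          have hmin : min 4 (s.length - 3 - j) = 4 := by
            have := congrArg List.length hocc; simp [patB] at this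
            rw [huprefix] at hl; simp at hl
            omega
          rw [hmin] at hocc
          exact hocc
        have hstep : (PySem.List.pyRange 0 4 1).foldl (fun s _ => s.dropLast) (s ++ [x]) = u := by
          rw [hsplit]; exact dropLast_four u
        rw [hstep]
        rw [ih u (c + 1) hun]
        -- right side: B finds the occurrence at u.length and deletes exactly patB
        have ht : s ++ x :: l' = u ++ (patB ++ l') := by
          rw [← List.append_assoc, ← hsplit]; simp
        have hfind : findPat (s ++ x :: l') 0 = some u.length := by
          apply findPat_some_of
          · omega
          · unfold occAt
            rw [ht, List.drop_append_of_le_length le_rfl]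
            simp [patB]
          · intro k _ hk hocc
            apply hs k
            have hks : k + 4 ≤ s.length := by
              have : u.length + 3 ≤ s.length := by omega
              omega
            unfold occAt at hocc ⊢
            have hcons : s ++ x :: l' = s ++ ([x] ++ l') := by simp
            rw [hcons, ← List.append_assoc] at hocc
            rw [List.drop_append_of_le_length (by simp; omega)] at hocc
            rw [List.take_append_of_le_length (by simp; omega)] at hocc
            rw [List.drop_append_of_le_length (by omega),
              List.take_append_of_le_length (by simp; omega)] at hocc
            exact hocc
        rw [altGo_of_some _ c u.length hfind]
        congr 1
        rw [ht]
        have h4l : u.length + 4 = (u ++ patB).length := by simp [patB]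
        rw [List.take_append_of_le_length le_rfl, List.take_length, h4l,
          ← List.append_assoc, List.drop_left]
      · -- no match: the new stack is still pattern-free
        rw [if_neg hc]
        have hend : ¬ (s ++ [x]).drop ((s ++ [x]).length - 4) = patB :=
          fun h => hc ((cond_iff _).mpr h)
        have := ih (s ++ [x]) c (noOcc_append_singleton s x hs hend)
        simpa using this

-- ===== VERDICT (by name: the statement is the Claim_ definition above) =====
theorem solution_spec : Claim_equal_solution := by
  intro ingredient _
  unfold Spec_solution solution solution_alt
  have := main_lemma ingredient [] 0 (by intro j h; unfold occAt patB at h; simp at h)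
  simpa using this
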